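-- pv_equiv track=rewrite | github.com/wayneyu/advent_of_code | 2022/day15.py | count_no_beacons_locations
-- ===== SOURCE A (Python) =====
-- def l1(a, b):
--     return abs(a[0] - b[0]) + abs(a[1] - b[1])
--
-- def count_no_beacons_locations(sensors_beacons):
--     def xys_within_dist(origin, l1_dist):
--         res = []
--         for x in range(origin[0] - l1_dist, origin[0] + l1_dist + 1):
--             for y in range(origin[1] - l1_dist, origin[1] + l1_dist + 1):
--                 if l1(origin, (x, y)) <= l1_dist:
--                     res.append((x, y))
--
--         return res
--
--     locations_without_beacons = set()
--     for sensor, beacon in sensors_beacons: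
--         xys = xys_within_dist(sensor, l1(sensor, beacon))
--         xys.remove(sensor)
--         xys.remove(beacon)
--         locations_without_beacons.update(xys)
--
--     return locations_without_beacons
-- ===== SOURCE B (Python) =====
-- def count_no_beacons_locations(sensors_beacons):
--     # Enumerates each sensor's L1 diamond directly (no square scan, no distance test)
--     # and skips the sensor and beacon cells instead of removing them afterwards.
--     locations = set()
--     for sensor, beacon in sensors_beacons:
--         sx, sy = sensor
--         d = abs(sx - beacon[0]) + abs(sy - beacon[1])
--         for dx in range(-d, d + 1):
--             r = d - abs(dx)
--             for dy in range(-r, r + 1):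
--                 p = (sx + dx, sy + dy)
--                 if p != sensor and p != beacon:
--                     locations.add(p)
--     return locations
-- ===== Notes on version B (the rewrite author's own statement) =====
-- stated objective: simpler
-- what changed: Replaces the square scan with an L1-distance test per cell by direct diamond enumeration (dy ranges over the per-column radius), and skips the sensor/beacon cells during enumeration instead of list.remove afterwards.
-- crash fix: A raises ValueError (list.remove of the already-removed beacon) whenever some pair has sensor == beacon; B returns the set built from that degenerate diamond, i.e. that pair contributes nothing. — e.g. on count_no_beacons_locations([((0, 0), (0, 0))]): A raises ValueError, B returns []
import Mathlib
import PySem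

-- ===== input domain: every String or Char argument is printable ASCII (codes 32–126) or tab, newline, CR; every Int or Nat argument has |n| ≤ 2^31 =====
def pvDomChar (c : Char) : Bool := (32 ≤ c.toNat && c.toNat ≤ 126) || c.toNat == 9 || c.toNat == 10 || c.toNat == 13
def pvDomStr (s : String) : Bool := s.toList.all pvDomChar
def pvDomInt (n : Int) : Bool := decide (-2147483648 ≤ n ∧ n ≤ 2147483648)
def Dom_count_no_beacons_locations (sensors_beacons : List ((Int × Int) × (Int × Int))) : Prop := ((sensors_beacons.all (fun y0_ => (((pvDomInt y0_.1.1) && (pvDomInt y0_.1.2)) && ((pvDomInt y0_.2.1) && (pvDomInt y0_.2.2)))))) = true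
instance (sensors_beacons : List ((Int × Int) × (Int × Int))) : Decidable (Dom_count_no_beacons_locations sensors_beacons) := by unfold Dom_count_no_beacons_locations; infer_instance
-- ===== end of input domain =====

-- B enumerates each sensor's L1 diamond directly (per-column dy range, no distance test) and skips the
-- sensor/beacon cells during enumeration instead of list.remove afterwards; same returned set.

-- ===== PORT A =====
def l1A (a b : Int × Int) : Int := |a.1 - b.1| + |a.2 - b.2|

def xysWithinDist (origin : Int × Int) (l1_dist : Int) : List (Int × Int) :=
  (PySem.List.pyRange (origin.1 - l1_dist) (origin.1 + l1_dist + 1) 1).foldl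
    (fun res x =>
      (PySem.List.pyRange (origin.2 - l1_dist) (origin.2 + l1_dist + 1) 1).foldl
        (fun res y => if l1A origin (x, y) ≤ l1_dist then res ++ [(x, y)] else res)
        res)
    []

def count_no_beacons_locations (sensors_beacons : List ((Int × Int) × (Int × Int))) : List (Int × Int) :=
  sensors_beacons.foldl
    (fun locs sb =>
      -- xys.remove(sensor); xys.remove(beacon): ValueError (none) excluded by Pre_
      PySem.Set.update locs
        ((PySem.List.remove?
            ((PySem.List.remove? (xysWithinDist sb.1 (l1A sb.1 sb.2)) sb.1).getD [])
            sb.2).getD []))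
    []

-- ===== PORT B =====
def count_no_beacons_locations_alt (sensors_beacons : List ((Int × Int) × (Int × Int))) : List (Int × Int) :=
  sensors_beacons.foldl
    (fun locs sb =>
      let d := |sb.1.1 - sb.2.1| + |sb.1.2 - sb.2.2|
      (PySem.List.pyRange (-d) (d + 1) 1).foldl
        (fun locs dx =>
          let r := d - |dx|
          (PySem.List.pyRange (-r) (r + 1) 1).foldl
            (fun locs dy =>
              let p := (sb.1.1 + dx, sb.1.2 + dy)
              if p ≠ sb.1 ∧ p ≠ sb.2 then PySem.Set.add locs p else locs)
            locs)
        locs)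
    []

-- ===== PRECONDITION & SPEC =====
-- Pre_ excludes exactly the pairs with sensor == beacon: there A's second list.remove raises ValueError.
def Pre_count_no_beacons_locations (sensors_beacons : List ((Int × Int) × (Int × Int))) : Prop :=
  ∀ sb ∈ sensors_beacons, sb.1 ≠ sb.2
instance (sensors_beacons : List ((Int × Int) × (Int × Int))) : Decidable (Pre_count_no_beacons_locations sensors_beacons) := by unfold Pre_count_no_beacons_locations; infer_instance

def pvWitness_count_no_beacons_locations : (List ((Int × Int) × (Int × Int))) := [((0, 0), (1, 0))]

-- A raises ValueError (list.remove of the already-removed beacon) whenever some pair has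
-- sensor == beacon; B returns the set for that degenerate diamond (nothing from that pair).
def Raises_count_no_beacons_locations (sensors_beacons : List ((Int × Int) × (Int × Int))) : Prop :=
  ∃ sb ∈ sensors_beacons, sb.1 = sb.2
instance (sensors_beacons : List ((Int × Int) × (Int × Int))) : Decidable (Raises_count_no_beacons_locations sensors_beacons) := by unfold Raises_count_no_beacons_locations; infer_instance

def pvRaiseWitness_count_no_beacons_locations : (List ((Int × Int) × (Int × Int))) := [((0, 0), (0, 0))]
def pvRaiseWitnessOut_count_no_beacons_locations : List (Int × Int) := []

def Spec_count_no_beacons_locations (sensors_beacons : List ((Int × Int) × (Int × Int))) (out : List (Int × Int)) : Prop := out = count_no_beacons_locations_alt sensors_beacons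
instance (sensors_beacons : List ((Int × Int) × (Int × Int))) (out : List (Int × Int)) : Decidable (Spec_count_no_beacons_locations sensors_beacons out) := by unfold Spec_count_no_beacons_locations; infer_instance

-- ===== CLAIM (what is proved, stated in full; the proofs are below) =====
def Claim_equal_count_no_beacons_locations : Prop := ∀ (sensors_beacons : List ((Int × Int) × (Int × Int))), Dom_count_no_beacons_locations sensors_beacons → Pre_count_no_beacons_locations sensors_beacons → Spec_count_no_beacons_locations sensors_beacons (count_no_beacons_locations sensors_beacons)

def Claim_raises_count_no_beacons_locations : Prop := (∀ (sensors_beacons : List ((Int × Int) × (Int × Int))), Dom_count_no_beacons_locations sensors_beacons → Raises_count_no_beacons_locations sensors_beacons → ¬ Pre_count_no_beacons_locations sensors_beacons) ∧ (Dom_count_no_beacons_locations (pvRaiseWitness_count_no_beacons_locations) ∧ Raises_count_no_beacons_locations (pvRaiseWitness_count_no_beacons_locations) ∧ count_no_beacons_locations_alt (pvRaiseWitness_count_no_beacons_locations) = pvRaiseWitnessOut_count_no_beacons_locations)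

-- ===== LEMMAS AND PROOFS =====

-- the diamond of L1-radius d around s, in A's (and B's) enumeration order
def pvDiamond (s : Int × Int) (d : Int) : List (Int × Int) :=
  (PySem.List.pyRange (-d) (d + 1) 1).flatMap (fun dx =>
    (PySem.List.pyRange (-(d - |dx|)) ((d - |dx|) + 1) 1).map (fun dy => (s.1 + dx, s.2 + dy)))

lemma pvBne_eq_decide (p s : Int × Int) : (p != s) = decide (p ≠ s) := by
  by_cases h : p = s <;> simp [h]

lemma pvRange_shift (a b c : Int) :
    (PySem.List.pyRange a b 1).map (fun k => c + k) = PySem.List.pyRange (c + a) (c + b) 1 := by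
  simp [PySem.List.pyRange_one]; intros; ring

lemma pvFilter_pyRange_interval (a b lo hi : Int) (h1 : a ≤ lo) (h2 : hi + 1 ≤ b)
    (p : Int → Bool) (hp : ∀ y, p y = decide (lo ≤ y ∧ y ≤ hi)) :
    (PySem.List.pyRange a b 1).filter p = PySem.List.pyRange lo (hi + 1) 1 := by
  have hperm : (PySem.List.pyRange lo (hi + 1) 1).Perm ((PySem.List.pyRange a b 1).filter p) := by
    refine (List.perm_ext_iff_of_nodup (PySem.List.nodup_pyRange_one _ _)
      ((PySem.List.nodup_pyRange_one _ _).filter p)).mpr ?_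
    intro x
    simp only [List.mem_filter, PySem.List.mem_pyRange_one, hp, decide_eq_true_eq]
    omega
  have h3 := PySem.List.sorted_eq_of_perm_of_pairwise_lt
    ((PySem.List.pyRange a b 1).filter p) ((PySem.List.pyRange a b 1).filter p) (fun x => x)
    (List.Perm.refl _) ((PySem.List.pairwise_lt_pyRange_one a b).filter p)
  have h4 := PySem.List.sorted_eq_of_perm_of_pairwise_lt
    ((PySem.List.pyRange a b 1).filter p) (PySem.List.pyRange lo (hi + 1) 1) (fun x => x)
    hperm (PySem.List.pairwise_lt_pyRange_one lo (hi + 1))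
  rw [← h3, h4]

lemma pvMem_diamond (s : Int × Int) (d : Int) (hd : 0 ≤ d) (p : Int × Int) :
    p ∈ pvDiamond s d ↔ |p.1 - s.1| + |p.2 - s.2| ≤ d := by
  simp only [pvDiamond, List.mem_flatMap, List.mem_map, PySem.List.mem_pyRange_one]
  constructor
  · rintro ⟨dx, ⟨h1, h2⟩, dy, ⟨h3, h4⟩, rfl⟩
    simp only
    rcases abs_cases dx with ⟨e1, _⟩ | ⟨e1, _⟩ <;>
      rcases abs_cases (s.1 + dx - s.1) with ⟨e2, _⟩ | ⟨e2, _⟩ <;>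
      rcases abs_cases (s.2 + dy - s.2) with ⟨e3, _⟩ | ⟨e3, _⟩ <;> omega
  · intro h
    refine ⟨p.1 - s.1, ?_, p.2 - s.2, ?_, by simp⟩ <;>
      rcases abs_cases (p.1 - s.1) with ⟨e1, _⟩ | ⟨e1, _⟩ <;>
      rcases abs_cases (p.2 - s.2) with ⟨e2, _⟩ | ⟨e2, _⟩ <;> omega

lemma pvNodup_diamond (s : Int × Int) (d : Int) : (pvDiamond s d).Nodup := by
  unfold pvDiamond
  rw [List.nodup_flatMap]
  constructor
  · intro dx _
    exact (PySem.List.nodup_pyRange_one _ _).map (fun a b h => by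
      have := congrArg Prod.snd h; simp at this; omega)
  · refine (PySem.List.pairwise_lt_pyRange_one _ _).imp ?_
    intro dx1 dx2 hlt
    simp only [Function.onFun]
    rw [List.disjoint_left]
    rintro q hq1 hq2
    simp only [List.mem_map] at hq1 hq2
    obtain ⟨dy1, _, rfl⟩ := hq1
    obtain ⟨dy2, _, he⟩ := hq2
    have := congrArg Prod.fst he; simp at this; omega

-- A's square scan with the L1 test enumerates exactly the diamond, in the same order
lemma pvXys_eq_diamond (s : Int × Int) (d : Int) :
    xysWithinDist s d = pvDiamond s d := by
  unfold xysWithinDist pvDiamond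
  have hinner : ∀ (x : Int) (res : List (Int × Int)),
      (PySem.List.pyRange (s.2 - d) (s.2 + d + 1) 1).foldl
        (fun res y => if l1A s (x, y) ≤ d then res ++ [(x, y)] else res) res
      = res ++ ((PySem.List.pyRange (s.2 - d) (s.2 + d + 1) 1).filter
          (fun y => decide (l1A s (x, y) ≤ d))).map (fun y => (x, y)) := by
    intro x res
    exact PySem.List.foldl_append_ite _ _ _ _
  calc (PySem.List.pyRange (s.1 - d) (s.1 + d + 1) 1).foldl
        (fun res x =>
          (PySem.List.pyRange (s.2 - d) (s.2 + d + 1) 1).foldl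
            (fun res y => if l1A s (x, y) ≤ d then res ++ [(x, y)] else res) res) []
      = (PySem.List.pyRange (s.1 - d) (s.1 + d + 1) 1).foldl
          (fun res x => res ++ ((PySem.List.pyRange (s.2 - d) (s.2 + d + 1) 1).filter
            (fun y => decide (l1A s (x, y) ≤ d))).map (fun y => (x, y))) [] := by
        exact PySem.List.foldl_congr_mem _ _ _ _ (fun res x _ => hinner x res)
    _ = (PySem.List.pyRange (s.1 - d) (s.1 + d + 1) 1).flatMap
          (fun x => ((PySem.List.pyRange (s.2 - d) (s.2 + d + 1) 1).filter
            (fun y => decide (l1A s (x, y) ≤ d))).map (fun y => (x, y))) := by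
        exact PySem.List.foldl_append_eq_flatMap _ _ _
    _ = _ := by
        have e1 : s.1 - d = s.1 + -d := by ring
        have e2 : s.1 + d + 1 = s.1 + (d + 1) := by ring
        rw [e1, e2, ← pvRange_shift (-d) (d + 1) s.1, List.flatMap_map]
        refine List.flatMap_congr ?_
        intro dx hdx
        rw [PySem.List.mem_pyRange_one] at hdx
        have habs : |dx| ≤ d := by
          rcases abs_cases dx with ⟨e, _⟩ | ⟨e, _⟩ <;> omega
        have habs0 : 0 ≤ |dx| := abs_nonneg dx
        have hf : (PySem.List.pyRange (s.2 - d) (s.2 + d + 1) 1).filter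
            (fun y => decide (l1A s (s.1 + dx, y) ≤ d))
            = PySem.List.pyRange (s.2 - (d - |dx|)) ((s.2 + (d - |dx|)) + 1) 1 := by
          refine pvFilter_pyRange_interval _ _ _ _ (by omega) (by omega) _ ?_
          intro y
          simp only [l1A, decide_eq_decide]
          rcases abs_cases (s.1 - (s.1 + dx)) with ⟨e1, _⟩ | ⟨e1, _⟩ <;>
            rcases abs_cases dx with ⟨e2, _⟩ | ⟨e2, _⟩ <;>
            rcases abs_cases (s.2 - y) with ⟨e3, _⟩ | ⟨e3, _⟩ <;> omega
        have hr : PySem.List.pyRange (s.2 - (d - |dx|)) ((s.2 + (d - |dx|)) + 1) 1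
            = PySem.List.pyRange (s.2 + -(d - |dx|)) (s.2 + ((d - |dx|) + 1)) 1 := by
          have e3 : s.2 - (d - |dx|) = s.2 + -(d - |dx|) := by ring
          have e4 : (s.2 + (d - |dx|)) + 1 = s.2 + ((d - |dx|) + 1) := by ring
          rw [e3, e4]
        rw [hf, hr, ← pvRange_shift (-(d - |dx|)) ((d - |dx|) + 1) s.2, List.map_map]
        exact List.map_congr_left (fun dy _ => rfl)

-- one loop iteration: A's remove-remove-update equals B's skip-while-adding nested loops
lemma pvStep_eq (locs : List (Int × Int)) (s b : Int × Int) (hne : s ≠ b) :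
    PySem.Set.update locs
      ((PySem.List.remove?
          ((PySem.List.remove? (xysWithinDist s (l1A s b)) s).getD []) b).getD [])
    = (PySem.List.pyRange (-(l1A s b)) ((l1A s b) + 1) 1).foldl
        (fun locs dx =>
          (PySem.List.pyRange (-((l1A s b) - |dx|)) (((l1A s b) - |dx|) + 1) 1).foldl
            (fun locs dy =>
              if (s.1 + dx, s.2 + dy) ≠ s ∧ (s.1 + dx, s.2 + dy) ≠ b then
                PySem.Set.add locs (s.1 + dx, s.2 + dy)
              else locs)
            locs)
        locs := by
  set d := l1A s b with hdd
  have hd : 0 ≤ d := by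
    simp only [hdd, l1A]
    have := abs_nonneg (s.1 - b.1); have := abs_nonneg (s.2 - b.2); omega
  have hL := pvXys_eq_diamond s d
  have hnod := pvNodup_diamond s d
  have hsmem : s ∈ pvDiamond s d := by rw [pvMem_diamond s d hd]; simp; omega
  have hbmem : b ∈ pvDiamond s d := by
    rw [pvMem_diamond s d hd]
    simp only [hdd, l1A, abs_sub_comm b.1 s.1, abs_sub_comm b.2 s.2]
    exact le_rfl
  -- LHS: the two removes are erases, which on a Nodup list are filters
  have h1 : PySem.List.remove? (pvDiamond s d) s = some ((pvDiamond s d).erase s) :=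
    PySem.List.remove?_eq_some_erase _ s hsmem
  have hbmem' : b ∈ (pvDiamond s d).erase s := (List.mem_erase_of_ne (Ne.symm hne)).mpr hbmem
  have h2 : PySem.List.remove? ((pvDiamond s d).erase s) b
      = some (((pvDiamond s d).erase s).erase b) := PySem.List.remove?_eq_some_erase _ b hbmem'
  rw [hL, h1, Option.getD_some, h2, Option.getD_some,
    (hnod.erase s).erase_eq_filter b, hnod.erase_eq_filter s, List.filter_filter]
  -- RHS: the skipping nested loops add exactly the filtered diamond
  have hrhs : (PySem.List.pyRange (-d) (d + 1) 1).foldl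
      (fun locs dx =>
        (PySem.List.pyRange (-(d - |dx|)) ((d - |dx|) + 1) 1).foldl
          (fun locs dy =>
            if (s.1 + dx, s.2 + dy) ≠ s ∧ (s.1 + dx, s.2 + dy) ≠ b then
              PySem.Set.add locs (s.1 + dx, s.2 + dy)
            else locs)
          locs)
      locs
      = ((pvDiamond s d).filter (fun p => decide (p ≠ s) && decide (p ≠ b))).foldl
          PySem.Set.add locs := by
    have hcol : ∀ (dx : Int) (acc : List (Int × Int)),
        (PySem.List.pyRange (-(d - |dx|)) ((d - |dx|) + 1) 1).foldl
          (fun locs dy =>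
            if (s.1 + dx, s.2 + dy) ≠ s ∧ (s.1 + dx, s.2 + dy) ≠ b then
              PySem.Set.add locs (s.1 + dx, s.2 + dy)
            else locs)
          acc
        = (((PySem.List.pyRange (-(d - |dx|)) ((d - |dx|) + 1) 1).map
              (fun dy => (s.1 + dx, s.2 + dy))).filter
            (fun p => decide (p ≠ s) && decide (p ≠ b))).foldl PySem.Set.add acc := by
      intro dx acc
      rw [PySem.List.foldl_ite_eq_foldl_filter, List.filter_map, ← List.foldl_map]
      refine congrArg _ (congrArg _ (List.filter_congr ?_))
      intro dy _
      simp [Function.comp, Bool.decide_and]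
    calc _ = (PySem.List.pyRange (-d) (d + 1) 1).foldl
          (fun acc dx => (((PySem.List.pyRange (-(d - |dx|)) ((d - |dx|) + 1) 1).map
              (fun dy => (s.1 + dx, s.2 + dy))).filter
            (fun p => decide (p ≠ s) && decide (p ≠ b))).foldl PySem.Set.add acc) locs := by
          exact PySem.List.foldl_congr_mem _ _ _ _ (fun acc dx _ => hcol dx acc)
      _ = _ := by rw [← List.foldl_flatMap, ← List.filter_flatMap]; rfl
  rw [hrhs]
  -- both sides are now foldl add over a filtered diamond; match the predicates
  have hpred : (fun p => (p != b) && (p != s))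
      = (fun (p : Int × Int) => decide (p ≠ s) && decide (p ≠ b)) := by
    funext p
    rw [pvBne_eq_decide p b, pvBne_eq_decide p s, Bool.and_comm]
  rw [hpred]
  rfl

-- ===== VERDICT (by name: the statement is the Claim_ definition above) =====
theorem count_no_beacons_locations_spec : Claim_equal_count_no_beacons_locations := by
  intro sbs _ hpre
  unfold Spec_count_no_beacons_locations count_no_beacons_locations count_no_beacons_locations_alt
  refine PySem.List.foldl_congr_mem' _ _ _ _ ?_
  intro sb hsb locs
  exact pvStep_eq locs sb.1 sb.2 (hpre sb hsb)

@[simp] theorem count_no_beacons_locations_raises : Claim_raises_count_no_beacons_locations := by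
  unfold Claim_raises_count_no_beacons_locations
  refine ⟨?_, by decide⟩
  rintro sbs _ ⟨sb, hmem, heq⟩ hpre
  exact hpre sb hmem heq
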